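-- pv_equiv track=rewrite | github.com/adamritter/lazyviewer | lazyviewer/source_pane/diff.py | _boost_foreground_contrast_for_diff
-- ===== SOURCE A (Python) =====
-- _DIFF_CONTRAST_8BIT = "246"
--
-- _DIFF_CONTRAST_TRUECOLOR = ("170", "170", "170")
--
-- def _boost_foreground_contrast_for_diff(params: str) -> str:
--     """Adjust low-contrast foreground SGR params for diff background readability."""
--     parts = [part for part in params.split(";") if part]
--     if not parts:
--         return params
--
--     boosted: list[str] = []
--     index = 0
--     while index < len(parts):
--         token = parts[index]
--
--         if token in {"38", "48"} and index + 1 < len(parts):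
--             mode = parts[index + 1]
--             if mode == "5" and index + 2 < len(parts):
--                 color_token = parts[index + 2]
--                 if token == "38":
--                     try:
--                         color_index = int(color_token)
--                     except ValueError:
--                         color_index = -1
--                     if 232 <= color_index <= 248:
--                         boosted.extend(["38", "5", _DIFF_CONTRAST_8BIT])
--                         index += 3
--                         continue
--                 boosted.extend([token, "5", color_token])
--                 index += 3
--                 continue
--             if mode == "2" and index + 4 < len(parts):
--                 red_token = parts[index + 2]
--                 green_token = parts[index + 3]
--                 blue_token = parts[index + 4]
--                 if token == "38":
--                     try:
--                         red = int(red_token)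
--                         green = int(green_token)
--                         blue = int(blue_token)
--                     except ValueError:
--                         red = green = blue = -1
--                     if (
--                         red >= 0
--                         and green >= 0
--                         and blue >= 0
--                         and abs(red - green) <= 8
--                         and abs(green - blue) <= 8
--                         and max(red, green, blue) < 190
--                     ):
--                         boosted.extend(["38", "2", *_DIFF_CONTRAST_TRUECOLOR])
--                         index += 5
--                         continue
--                 boosted.extend([token, "2", red_token, green_token, blue_token])
--                 index += 5
--                 continue
--
--         # Drop faint text attribute so dim tokens stay legible on diff backgrounds.
--         if token == "2":
--             index += 1
--             continue
--
--         if token in {"30", "90"}: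
--             boosted.extend(["38", "5", _DIFF_CONTRAST_8BIT])
--             index += 1
--             continue
--
--         boosted.append(token)
--         index += 1
--
--     return ";".join(boosted)
-- ===== SOURCE B (Python) =====
-- _DIFF_CONTRAST_8BIT = "246"
--
-- _DIFF_CONTRAST_TRUECOLOR = ("170", "170", "170")
--
--
-- def _int_or_neg1(token):
--     try:
--         return int(token)
--     except ValueError:
--         return -1
--
--
-- def _group(parts):
--     """Split the token stream into extended-color groups (len 3 or 5) and singles."""
--     groups = []
--     i = 0
--     n = len(parts)
--     while i < n:
--         t = parts[i]
--         if t in ("38", "48") and i + 2 < n and parts[i + 1] == "5":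
--             groups.append(parts[i:i + 3])
--             i += 3
--         elif t in ("38", "48") and i + 4 < n and parts[i + 1] == "2":
--             groups.append(parts[i:i + 5])
--             i += 5
--         else:
--             groups.append([t])
--             i += 1
--     return groups
--
--
-- def _render(group):
--     """Map one group to its replacement token list."""
--     if len(group) == 3:
--         t, _, c = group
--         if t == "38" and 232 <= _int_or_neg1(c) <= 248:
--             return ["38", "5", _DIFF_CONTRAST_8BIT]
--         return group
--     if len(group) == 5:
--         t, _, r, g, b = group
--         red, green, blue = _int_or_neg1(r), _int_or_neg1(g), _int_or_neg1(b)
--         if (t == "38" and red >= 0 and green >= 0 and blue >= 0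
--                 and abs(red - green) <= 8 and abs(green - blue) <= 8
--                 and max(red, green, blue) < 190):
--             return ["38", "2", *_DIFF_CONTRAST_TRUECOLOR]
--         return group
--     (t,) = group
--     if t == "2":
--         return []
--     if t in ("30", "90"):
--         return ["38", "5", _DIFF_CONTRAST_8BIT]
--     return group
--
--
-- def _boost_foreground_contrast_for_diff(params: str) -> str:
--     parts = [part for part in params.split(";") if part]
--     if not parts:
--         return params
--     return ";".join(tok for g in _group(parts) for tok in _render(g))
-- ===== Notes on version B (the rewrite author's own statement) =====
-- stated objective: simpler
-- what changed: Replaced A's single cursor loop that mixes parsing and rewriting (with fall-through continues) by two small passes: first group the token stream into extended-color groups and singles, then map each group independently to its replacement and join.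
import Mathlib
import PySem

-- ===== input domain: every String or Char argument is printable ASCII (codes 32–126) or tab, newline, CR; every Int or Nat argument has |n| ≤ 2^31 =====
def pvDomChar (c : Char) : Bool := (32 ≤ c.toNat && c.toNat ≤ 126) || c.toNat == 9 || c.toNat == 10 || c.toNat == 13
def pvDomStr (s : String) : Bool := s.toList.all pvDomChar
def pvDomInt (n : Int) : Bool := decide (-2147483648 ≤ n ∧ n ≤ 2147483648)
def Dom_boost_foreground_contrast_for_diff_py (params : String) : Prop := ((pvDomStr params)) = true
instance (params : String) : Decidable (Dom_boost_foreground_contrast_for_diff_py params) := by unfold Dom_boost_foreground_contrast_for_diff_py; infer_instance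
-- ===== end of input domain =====

-- B replaces A's single cursor loop (parsing and rewriting interleaved, with fall-through
-- continues) by two passes: group the tokens into SGR color groups, then map each group
-- to its replacement. Objective: simpler decomposition; same return value everywhere.

-- ===== PORT A =====
-- int(token) with try/except ValueError: color_index = -1
def pvIntOr (t : String) : Int := (PySem.Int.ofStr? t).getD (-1)

-- the while-loop of A over the suffix of `parts` still to process (index i ↦ the suffix
-- parts[i:], parts[index+k] ↦ rest.getD (k-1) "", index += k ↦ drop (k-1) of rest);
-- `fallthru` is the common tail of the loop body (drop faint "2", boost "30"/"90", else append)
def pvLoopA : List String → List String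
  | [] => []
  | t :: rest =>
    let fallthru :=
      if t = "2" then pvLoopA rest
      else if t = "30" ∨ t = "90" then "38" :: "5" :: "246" :: pvLoopA rest
      else t :: pvLoopA rest
    if (t = "38" ∨ t = "48") ∧ rest ≠ [] then
      let mode := rest.getD 0 ""
      if mode = "5" ∧ 2 ≤ rest.length then
        let c := rest.getD 1 ""
        (if t = "38" then
           (if 232 ≤ pvIntOr c ∧ pvIntOr c ≤ 248 then ["38", "5", "246"] else [t, "5", c])
         else [t, "5", c]) ++ pvLoopA (rest.drop 2)
      else if mode = "2" ∧ 4 ≤ rest.length then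
        let a := rest.getD 1 ""
        let b := rest.getD 2 ""
        let c := rest.getD 3 ""
        (if t = "38" then
           (let rgb : Int × Int × Int :=
              match PySem.Int.ofStr? a, PySem.Int.ofStr? b, PySem.Int.ofStr? c with
              | some r, some g, some bl => (r, g, bl)
              | _, _, _ => (-1, -1, -1)
            if 0 ≤ rgb.1 ∧ 0 ≤ rgb.2.1 ∧ 0 ≤ rgb.2.2 ∧
               |rgb.1 - rgb.2.1| ≤ 8 ∧ |rgb.2.1 - rgb.2.2| ≤ 8 ∧
               max rgb.1 (max rgb.2.1 rgb.2.2) < 190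
            then ["38", "2", "170", "170", "170"]
            else [t, "2", a, b, c])
         else [t, "2", a, b, c]) ++ pvLoopA (rest.drop 4)
      else fallthru
    else fallthru
termination_by l => l.length
decreasing_by all_goals (simp only [List.length_drop, List.length_cons]; omega)

def boost_foreground_contrast_for_diff_py (params : String) : String :=
  let parts := ((PySem.Str.split? params ";").getD []).filter (· ≠ "")
  if parts = [] then params
  else PySem.Str.join ";" (pvLoopA parts)

-- ===== PORT B =====
-- first pass: cut the token stream into groups (len-3 "…;5;c", len-5 "…;2;r;g;b", singles)
def pvGroup : List String → List (List String)
  | [] => []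
  | t :: rest =>
    if (t = "38" ∨ t = "48") ∧ rest.head? = some "5" ∧ 2 ≤ rest.length then
      (t :: rest.take 2) :: pvGroup (rest.drop 2)
    else if (t = "38" ∨ t = "48") ∧ rest.head? = some "2" ∧ 4 ≤ rest.length then
      (t :: rest.take 4) :: pvGroup (rest.drop 4)
    else [t] :: pvGroup rest
termination_by l => l.length
decreasing_by all_goals (simp only [List.length_drop, List.length_cons]; omega)

-- second pass: replacement for one group
def pvRender (g : List String) : List String :=
  match g with
  | [t, _, c] =>
    if t = "38" ∧ 232 ≤ pvIntOr c ∧ pvIntOr c ≤ 248 then ["38", "5", "246"] else g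
  | [t, _, r, gr, b] =>
    if t = "38" ∧ 0 ≤ pvIntOr r ∧ 0 ≤ pvIntOr gr ∧ 0 ≤ pvIntOr b ∧
       |pvIntOr r - pvIntOr gr| ≤ 8 ∧ |pvIntOr gr - pvIntOr b| ≤ 8 ∧
       max (pvIntOr r) (max (pvIntOr gr) (pvIntOr b)) < 190
    then ["38", "2", "170", "170", "170"] else g
  | [t] =>
    if t = "2" then []
    else if t = "30" ∨ t = "90" then ["38", "5", "246"]
    else g
  | _ => g

def boost_foreground_contrast_for_diff_py_alt (params : String) : String :=
  let parts := ((PySem.Str.split? params ";").getD []).filter (· ≠ "")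
  if parts = [] then params
  else PySem.Str.join ";" ((pvGroup parts).flatMap pvRender)

-- ===== PRECONDITION & SPEC =====
def Spec_boost_foreground_contrast_for_diff_py (params : String) (out : String) : Prop := out = boost_foreground_contrast_for_diff_py_alt params
instance (params : String) (out : String) : Decidable (Spec_boost_foreground_contrast_for_diff_py params out) := by unfold Spec_boost_foreground_contrast_for_diff_py; infer_instance

-- ===== CLAIM (what is proved, stated in full; the proofs are below) =====
def Claim_equal_boost_foreground_contrast_for_diff_py : Prop := ∀ (params : String), Dom_boost_foreground_contrast_for_diff_py params → Spec_boost_foreground_contrast_for_diff_py params (boost_foreground_contrast_for_diff_py params)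

-- ===== LEMMAS AND PROOFS =====

-- the loop of A computes exactly the rendered groups of B (bounded-length induction)
theorem pvLoop_eq_aux : ∀ (n : Nat) (l : List String), l.length ≤ n →
    pvLoopA l = (pvGroup l).flatMap pvRender := by
  intro n
  induction n with
  | zero =>
    intro l hl
    have : l = [] := by cases l <;> simp_all
    subst this; simp [pvLoopA, pvGroup]
  | succ n ih =>
    intro l hl
    match l with
    | [] => simp [pvLoopA, pvGroup]
    | t :: rest =>
      by_cases h38 : t = "38" ∨ t = "48"
      · cases rest with
        | nil =>
          rcases h38 with h | h <;> subst h <;>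
            simp [pvLoopA, pvGroup, pvRender]
        | cons m rest1 =>
          by_cases hm5 : m = "5"
          · subst hm5
            cases rest1 with
            | nil =>
              have hr : pvLoopA ["5"] = (pvGroup ["5"]).flatMap pvRender :=
                ih ["5"] (by simp at hl ⊢; omega)
              rcases h38 with h | h <;> subst h <;>
                simp [pvLoopA, pvGroup, pvRender, hr]
            | cons c rest2 =>
              have hr : pvLoopA rest2 = (pvGroup rest2).flatMap pvRender :=
                ih rest2 (by simp at hl ⊢; omega)
              rcases h38 with h | h <;> subst h <;>
                simp [pvLoopA, pvGroup, pvRender, hr]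
          · by_cases hm2 : m = "2"
            · subst hm2
              match rest1 with
              | [] =>
                have hr : pvLoopA ["2"] = (pvGroup ["2"]).flatMap pvRender :=
                  ih ["2"] (by simp at hl ⊢; omega)
                rcases h38 with h | h <;> subst h <;>
                  simp [pvLoopA, pvGroup, pvRender, hr]
              | [a] =>
                have hr : pvLoopA ["2", a] = (pvGroup ["2", a]).flatMap pvRender :=
                  ih ["2", a] (by simp at hl ⊢; omega)
                rcases h38 with h | h <;> subst h <;>
                  simp [pvLoopA, pvGroup, pvRender, hr]
              | [a, b] =>
                have hr : pvLoopA ["2", a, b] = (pvGroup ["2", a, b]).flatMap pvRender :=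
                  ih ["2", a, b] (by simp at hl ⊢; omega)
                rcases h38 with h | h <;> subst h <;>
                  simp [pvLoopA, pvGroup, pvRender, hr]
              | a :: b :: c :: rest2 =>
                have hr : pvLoopA rest2 = (pvGroup rest2).flatMap pvRender :=
                  ih rest2 (by simp at hl ⊢; omega)
                rcases h38 with h | h <;> subst h
                · -- t = "38": A parses all-or-nothing, B parses each token independently
                  rcases ha : PySem.Int.ofStr? a with _ | r <;>
                    rcases hb : PySem.Int.ofStr? b with _ | g <;>
                    rcases hc : PySem.Int.ofStr? c with _ | bl <;>
                    simp [pvLoopA, pvGroup, pvRender, pvIntOr, ha, hb, hc, hr]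
                · simp [pvLoopA, pvGroup, pvRender, hr]
            · have hr : pvLoopA (m :: rest1) = (pvGroup (m :: rest1)).flatMap pvRender :=
                ih (m :: rest1) (by simp at hl ⊢; omega)
              have ht : t ≠ "2" ∧ t ≠ "30" ∧ t ≠ "90" := by
                rcases h38 with h | h <;> subst h <;> exact ⟨by decide, by decide, by decide⟩
              simp [pvLoopA, pvGroup, pvRender, h38, hm5, hm2, hr, ht.1, ht.2.1, ht.2.2]
      · have hr : pvLoopA rest = (pvGroup rest).flatMap pvRender :=
          ih rest (by simp at hl ⊢; omega)
        have h38' : ¬ (t = "38" ∨ t = "48") := h38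
        by_cases ht2 : t = "2" <;> by_cases ht39 : t = "30" ∨ t = "90" <;>
          simp_all [pvLoopA, pvGroup, pvRender]

theorem pvLoopA_eq_group_render (l : List String) :
    pvLoopA l = (pvGroup l).flatMap pvRender :=
  pvLoop_eq_aux l.length l le_rfl

-- ===== VERDICT (by name: the statement is the Claim_ definition above) =====
theorem boost_foreground_contrast_for_diff_py_spec : Claim_equal_boost_foreground_contrast_for_diff_py := by
  intro params _
  unfold Spec_boost_foreground_contrast_for_diff_py
  unfold boost_foreground_contrast_for_diff_py boost_foreground_contrast_for_diff_py_alt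
  simp only [pvLoopA_eq_group_render]
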